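-- pv_equiv track=rewrite | github.com/RSv618/engineering_apps | rebar_optimizer.py | enumerate_patterns
-- ===== SOURCE A (Python) =====
-- def enumerate_patterns(stock_len_mm: int, piece_lengths_mm: list[int], max_counts: list[int]) -> list:
--     """
--     Enumerate integer patterns for one stock length.
--     Each pattern is a tuple (counts_tuple, used_length_mm_without_kerf).
--     """
--     n = len(piece_lengths_mm)
--     # Upper bound for the count of each piece in a single stock
--     ub = [min(max_counts[i], stock_len_mm // piece_lengths_mm[i]) for i in range(n)]
--     patterns = []
--
--     def rec(i, cur_counts, cur_used):
--         if i == n: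
--             if any(c > 0 for c in cur_counts):
--                 patterns.append((tuple(cur_counts), cur_used))
--             return
--
--         pl = piece_lengths_mm[i]
--         for cnt in range(ub[i] + 1):
--             new_used = cur_used + cnt * pl
--             if new_used <= stock_len_mm:
--                 cur_counts.append(cnt)
--                 rec(i + 1, cur_counts, new_used)
--                 cur_counts.pop()
--             else:
--                 # Since piece_lengths are sorted, no further counts will fit
--                 break
--
--     rec(0, [], 0)
--     return patterns
-- ===== SOURCE B (Python) =====
-- def enumerate_patterns(stock_len_mm: int, piece_lengths_mm: list[int], max_counts: list[int]) -> list: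
--     """
--     Enumerate integer patterns for one stock length, breadth-first:
--     extend every partial pattern level by level instead of recursive backtracking.
--     """
--     ub = [min(mc, stock_len_mm // pl) for mc, pl in zip(max_counts, piece_lengths_mm)]
--     prefixes = [((), 0)]
--     for pl, u in zip(piece_lengths_mm, ub):
--         nxt = []
--         for counts, used in prefixes:
--             cnt = 0
--             while cnt <= u and used + cnt * pl <= stock_len_mm:
--                 nxt.append((counts + (cnt,), used + cnt * pl))
--                 cnt += 1
--         prefixes = nxt
--     return [p for p in prefixes if any(c > 0 for c in p[0])]
-- ===== Notes on version B (the rewrite author's own statement) =====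
-- stated objective: simpler
-- what changed: Replaces the recursive backtracking over a shared mutable counts list with an iterative breadth-first pass that extends every partial pattern level by level (zip + while, no recursion, no mutation).
import Mathlib
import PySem

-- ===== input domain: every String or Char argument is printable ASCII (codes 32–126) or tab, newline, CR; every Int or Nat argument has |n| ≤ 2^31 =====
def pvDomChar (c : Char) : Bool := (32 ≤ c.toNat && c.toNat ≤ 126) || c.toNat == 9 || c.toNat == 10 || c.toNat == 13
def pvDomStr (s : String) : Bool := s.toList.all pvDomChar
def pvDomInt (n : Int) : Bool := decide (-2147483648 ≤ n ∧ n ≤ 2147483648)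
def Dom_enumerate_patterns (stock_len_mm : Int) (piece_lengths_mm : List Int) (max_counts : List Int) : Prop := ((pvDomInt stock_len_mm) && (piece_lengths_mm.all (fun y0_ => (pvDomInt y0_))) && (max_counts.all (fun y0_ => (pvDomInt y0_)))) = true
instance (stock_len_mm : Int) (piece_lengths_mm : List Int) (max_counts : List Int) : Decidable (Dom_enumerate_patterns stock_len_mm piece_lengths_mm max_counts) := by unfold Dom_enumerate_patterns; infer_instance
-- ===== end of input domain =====

-- B replaces A's recursive backtracking (shared mutable counts list, per-level break) by an
-- iterative level-by-level extension of all partial patterns (simpler: no recursion, no mutation).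

-- ===== PORT A =====
-- A's inner `rec` / its `for cnt in range(ub[i]+1)` loop with break; the index i is rendered as
-- the remaining (piece_length, ub) pairs, the mutable `patterns` list as an accumulator.
mutual
def pvA_rec (stock : Int) (rest : List (Int × Int)) (cur_counts : List Int) (cur_used : Int)
    (patterns : List (List Int × Int)) : List (List Int × Int) :=
  match rest with
  | [] =>
      if cur_counts.any (fun c => decide (0 < c)) then patterns ++ [(cur_counts, cur_used)]
      else patterns
  | (pl, u) :: rest' =>
      pvA_for stock rest' pl cur_counts cur_used patterns (PySem.List.pyRange 0 (u + 1) 1)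
termination_by (rest.length, 0)

def pvA_for (stock : Int) (rest' : List (Int × Int)) (pl : Int) (cur_counts : List Int)
    (cur_used : Int) (patterns : List (List Int × Int)) (cnts : List Int) :
    List (List Int × Int) :=
  match cnts with
  | [] => patterns
  | cnt :: more =>
      let new_used := cur_used + cnt * pl
      if new_used ≤ stock then
        pvA_for stock rest' pl cur_counts cur_used
          (pvA_rec stock rest' (cur_counts ++ [cnt]) new_used patterns) more
      else patterns  -- break
termination_by (rest'.length, cnts.length + 1)
end

def enumerate_patterns (stock_len_mm : Int) (piece_lengths_mm : List Int) (max_counts : List Int) :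
    List (List Int × Int) :=
  let n := piece_lengths_mm.length
  let ub := (List.range n).map
    (fun i => min (max_counts.getD i 0) (PySem.Int.floordiv stock_len_mm (piece_lengths_mm.getD i 0)))
  pvA_rec stock_len_mm (piece_lengths_mm.zip ub) [] 0 []

-- ===== PORT B =====
-- one level of B's loop: extend every prefix with each count that still fits (the while loop)
def pvB_step (stock : Int) (prefixes : List (List Int × Int)) (pl u : Int) :
    List (List Int × Int) :=
  prefixes.foldl
    (fun nxt pr =>
      nxt ++ ((PySem.List.pyRange 0 (u + 1) 1).takeWhile
                (fun cnt => decide (pr.2 + cnt * pl ≤ stock))).map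
              (fun cnt => (pr.1 ++ [cnt], pr.2 + cnt * pl)))
    []

def enumerate_patterns_alt (stock_len_mm : Int) (piece_lengths_mm : List Int)
    (max_counts : List Int) : List (List Int × Int) :=
  let ub := List.zipWith (fun mc pl => min mc (PySem.Int.floordiv stock_len_mm pl))
    max_counts piece_lengths_mm
  let prefixes := (piece_lengths_mm.zip ub).foldl
    (fun prefs pu => pvB_step stock_len_mm prefs pu.1 pu.2) [([], 0)]
  prefixes.filter (fun pr => pr.1.any (fun c => decide (0 < c)))

-- ===== PRECONDITION & SPEC =====
-- Pre_ excludes exactly the inputs where Python A raises: a zero piece length (ZeroDivisionError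
-- in the `ub` comprehension) or max_counts shorter than piece_lengths_mm (IndexError there).
def Pre_enumerate_patterns (stock_len_mm : Int) (piece_lengths_mm : List Int)
    (max_counts : List Int) : Prop :=
  piece_lengths_mm.length ≤ max_counts.length ∧ ∀ pl ∈ piece_lengths_mm, pl ≠ 0
instance (stock_len_mm : Int) (piece_lengths_mm : List Int) (max_counts : List Int) : Decidable (Pre_enumerate_patterns stock_len_mm piece_lengths_mm max_counts) := by unfold Pre_enumerate_patterns; infer_instance

def pvWitness_enumerate_patterns : Int × List Int × List Int := (10, [3, 5], [2, 2])

def Spec_enumerate_patterns (stock_len_mm : Int) (piece_lengths_mm : List Int) (max_counts : List Int) (out : List (List Int × Int)) : Prop := out = enumerate_patterns_alt stock_len_mm piece_lengths_mm max_counts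
instance (stock_len_mm : Int) (piece_lengths_mm : List Int) (max_counts : List Int) (out : List (List Int × Int)) : Decidable (Spec_enumerate_patterns stock_len_mm piece_lengths_mm max_counts out) := by unfold Spec_enumerate_patterns; infer_instance

-- ===== CLAIM (what is proved, stated in full; the proofs are below) =====
def Claim_equal_enumerate_patterns : Prop := ∀ (stock_len_mm : Int) (piece_lengths_mm : List Int) (max_counts : List Int), Dom_enumerate_patterns stock_len_mm piece_lengths_mm max_counts → Pre_enumerate_patterns stock_len_mm piece_lengths_mm max_counts → Spec_enumerate_patterns stock_len_mm piece_lengths_mm max_counts (enumerate_patterns stock_len_mm piece_lengths_mm max_counts)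

-- ===== LEMMAS AND PROOFS =====

-- the DFS tree of full patterns grown from one prefix (proof-side characterisation of both ports)
def pvBuild (stock : Int) (rest : List (Int × Int)) (pr : List Int × Int) :
    List (List Int × Int) :=
  match rest with
  | [] => [pr]
  | (pl, u) :: rest' =>
      (((PySem.List.pyRange 0 (u + 1) 1).takeWhile
          (fun cnt => decide (pr.2 + cnt * pl ≤ stock))).map
        (fun cnt => (pr.1 ++ [cnt], pr.2 + cnt * pl))).flatMap (pvBuild stock rest')

def pvKeep : List Int × Int → Bool := fun pr => pr.1.any (fun c => decide (0 < c))

lemma pvB_fold (stock : Int) (rest : List (Int × Int)) (prefs : List (List Int × Int)) :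
    rest.foldl (fun prefs pu => pvB_step stock prefs pu.1 pu.2) prefs
      = prefs.flatMap (pvBuild stock rest) := by
  induction rest generalizing prefs with
  | nil => simp [pvBuild]
  | cons pu rest' ih =>
      obtain ⟨pl, u⟩ := pu
      rw [List.foldl_cons, ih]
      show (pvB_step stock prefs pl u).flatMap (pvBuild stock rest') = _
      rw [pvB_step, PySem.List.foldl_append_eq_flatMap]
      simp [pvBuild, List.flatMap_assoc]

lemma pvA_for_eq (stock pl : Int) (rest' : List (Int × Int))
    (hrec : ∀ cc cu pats, pvA_rec stock rest' cc cu pats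
      = pats ++ (pvBuild stock rest' (cc, cu)).filter pvKeep)
    (cnts : List Int) (cc : List Int) (cu : Int) (pats : List (List Int × Int)) :
    pvA_for stock rest' pl cc cu pats cnts
      = pats ++ ((cnts.takeWhile (fun cnt => decide (cu + cnt * pl ≤ stock))).flatMap
          (fun cnt => pvBuild stock rest' (cc ++ [cnt], cu + cnt * pl))).filter pvKeep := by
  induction cnts generalizing pats with
  | nil => simp [pvA_for]
  | cons cnt more ih =>
      rw [pvA_for]
      by_cases h : cu + cnt * pl ≤ stock
      · simp only [h, if_pos, decide_true, List.takeWhile_cons_of_pos, List.flatMap_cons,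
          List.filter_append]
        rw [ih, hrec, List.append_assoc]
      · simp [h, List.takeWhile_cons_of_neg]

lemma pvA_rec_eq (stock : Int) (rest : List (Int × Int)) :
    ∀ cc cu pats, pvA_rec stock rest cc cu pats
      = pats ++ (pvBuild stock rest (cc, cu)).filter pvKeep := by
  induction rest with
  | nil =>
      intro cc cu pats
      rw [pvA_rec, pvBuild]
      by_cases h : cc.any (fun c => decide (0 < c)) <;> simp [pvKeep, h]
  | cons pu rest' ih =>
      obtain ⟨pl, u⟩ := pu
      intro cc cu pats
      rw [pvA_rec, pvA_for_eq stock pl rest' ih, pvBuild]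
      simp [List.filter_flatMap, List.flatMap_map]

lemma pvUb_eq (stock : Int) (pls mcs : List Int) (h : pls.length ≤ mcs.length) :
    (List.range pls.length).map
        (fun i => min (mcs.getD i 0) (PySem.Int.floordiv stock (pls.getD i 0)))
      = List.zipWith (fun mc pl => min mc (PySem.Int.floordiv stock pl)) mcs pls := by
  apply List.ext_getElem
  · simp [List.length_zipWith]; omega
  · intro i h1 h2
    simp only [List.getElem_map, List.getElem_range, List.getElem_zipWith]
    simp only [List.length_map, List.length_range] at h1
    rw [List.getD_eq_getElem _ _ (by omega), List.getD_eq_getElem _ _ (by omega)]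

-- ===== VERDICT (by name: the statement is the Claim_ definition above) =====
theorem enumerate_patterns_spec : Claim_equal_enumerate_patterns := by
  intro stock pls mcs _hdom hpre
  show _ = _
  rw [enumerate_patterns, enumerate_patterns_alt]
  rw [pvUb_eq stock pls mcs hpre.1, pvB_fold, pvA_rec_eq]
  show List.filter pvKeep _ = List.filter pvKeep _
  simp
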